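-- pv_equiv track=rewrite | github.com/helloqxwang/crossembodimentaction | contact_gen/extract_contact_points.py | _resolve_robot_model_name
-- ===== SOURCE A (Python) =====
-- def _resolve_robot_model_name(robot_name: str, asset_names: set[str]) -> str:
--     if robot_name in asset_names:
--         return robot_name
--
--     preferred = {
--         "allegro": [
--             "dro/allegro/allegro_hand_left_extended",
--             "dro/allegro/allegro_hand_left",
--         ],
--         "barrett": [
--             "dro/barrett/model_extended",
--             "dro/barrett/model",
--         ],
--         "ezgripper": [
--             "dro/ezgripper/ezgripper_extended",
--             "dro/ezgripper/ezgripper",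
--         ],
--         "robotiq_3finger": [
--             "dro/urdf/robotiq_3finger_description_extended",
--             "dro/urdf/robotiq_3finger_description",
--         ],
--         "shadowhand": [
--             "dro/shadowhand/shadow_hand_right_extended",
--             "dro/shadowhand/shadow_hand_right",
--         ],
--     }
--     for candidate in preferred.get(robot_name, []):
--         if candidate in asset_names:
--             return candidate
--
--     candidates = [k for k in asset_names if (f"/{robot_name}/" in k) or (robot_name in k)]
--     if len(candidates) == 1:
--         return candidates[0]
--     if len(candidates) > 1:
--         candidates = sorted(
--             candidates,
--             key=lambda x: (
--                 int(x.startswith("dro/")),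
--                 int("extended" in x),
--                 int("right" in x),
--                 -len(x),
--             ),
--             reverse=True,
--         )
--         return candidates[0]
--     raise KeyError(f"Cannot resolve robot model for '{robot_name}'.")
-- ===== SOURCE B (Python) =====
-- def _rank(x: str):
--     return (x.startswith("dro/"), "extended" in x, "right" in x, -len(x))
--
--
-- def _resolve_robot_model_name(robot_name: str, asset_names: set[str]) -> str:
--     preferred = {
--         "allegro": [
--             "dro/allegro/allegro_hand_left_extended",
--             "dro/allegro/allegro_hand_left",
--         ],
--         "barrett": [
--             "dro/barrett/model_extended",
--             "dro/barrett/model",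
--         ],
--         "ezgripper": [
--             "dro/ezgripper/ezgripper_extended",
--             "dro/ezgripper/ezgripper",
--         ],
--         "robotiq_3finger": [
--             "dro/urdf/robotiq_3finger_description_extended",
--             "dro/urdf/robotiq_3finger_description",
--         ],
--         "shadowhand": [
--             "dro/shadowhand/shadow_hand_right_extended",
--             "dro/shadowhand/shadow_hand_right",
--         ],
--     }
--     # one prioritized exact-name pass: the name itself, then its preferred models
--     for candidate in (robot_name, *preferred.get(robot_name, ())):
--         if candidate in asset_names:
--             return candidate
--     # single streaming pass over asset_names keeping the best substring match;
--     # "/{robot_name}/" in k already implies robot_name in k, so one test suffices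
--     best = None
--     for k in asset_names:
--         if robot_name in k and (best is None or _rank(k) > _rank(best)):
--             best = k
--     if best is None:
--         raise KeyError(f"Cannot resolve robot model for '{robot_name}'.")
--     return best
-- ===== Notes on version B (the rewrite author's own statement) =====
-- stated objective: alternative
-- what changed: B merges the direct-membership check and the preferred loop into one prioritized exact-name pass, and replaces A's filter-then-sort fallback (build candidates list, len==1 branch, stable descending sort, take head) by a single streaming pass over asset_names keeping the best-ranked substring match in an accumulator, using that '/name/' in k already implies name in k so one substring test suffices.
import Mathlib
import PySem

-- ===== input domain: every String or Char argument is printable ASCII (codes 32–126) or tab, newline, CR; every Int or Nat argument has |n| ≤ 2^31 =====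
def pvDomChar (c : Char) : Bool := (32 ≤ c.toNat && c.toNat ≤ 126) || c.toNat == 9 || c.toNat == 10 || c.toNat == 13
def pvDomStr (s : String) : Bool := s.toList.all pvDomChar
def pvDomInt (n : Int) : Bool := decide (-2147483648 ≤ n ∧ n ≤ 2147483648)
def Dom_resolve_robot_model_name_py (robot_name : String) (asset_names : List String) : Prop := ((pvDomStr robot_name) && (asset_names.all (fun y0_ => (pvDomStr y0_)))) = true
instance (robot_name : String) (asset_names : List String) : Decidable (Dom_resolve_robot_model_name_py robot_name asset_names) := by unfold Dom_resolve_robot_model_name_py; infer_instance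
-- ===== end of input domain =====

-- B merges the membership check and preferred loop into one prioritized pass and replaces the
-- filter-then-sort fallback by a single streaming best-so-far pass (alternative decomposition);
-- the equivalence claimed is on inputs where A does not raise KeyError.


-- shared constant: the preferred table
def pvPreferred : PySem.Dict String (List String) :=
  PySem.Dict.ofList
  [("allegro", ["dro/allegro/allegro_hand_left_extended", "dro/allegro/allegro_hand_left"]),
   ("barrett", ["dro/barrett/model_extended", "dro/barrett/model"]),
   ("ezgripper", ["dro/ezgripper/ezgripper_extended", "dro/ezgripper/ezgripper"]),
   ("robotiq_3finger", ["dro/urdf/robotiq_3finger_description_extended", "dro/urdf/robotiq_3finger_description"]),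
   ("shadowhand", ["dro/shadowhand/shadow_hand_right_extended", "dro/shadowhand/shadow_hand_right"])]

-- key/rank = (int(x.startswith("dro/")), int("extended" in x), int("right" in x), -len(x))
def pvKey (x : String) : Int × Int × Int × Int :=
  ((if PySem.Str.startswith x "dro/" then 1 else 0),
   (if PySem.Str.isIn "extended" x then 1 else 0),
   (if PySem.Str.isIn "right" x then 1 else 0),
   -PySem.Str.len x)

-- Python's '<' on 4-tuples of ints/bools (lexicographic); exact because bools compare as 0/1 ints
def pvKeyLt (a b : Int × Int × Int × Int) : Bool :=
  decide (a.1 < b.1) || (a.1 == b.1 && (decide (a.2.1 < b.2.1) || (a.2.1 == b.2.1 &&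
    (decide (a.2.2.1 < b.2.2.1) || (a.2.2.1 == b.2.2.1 && decide (a.2.2.2 < b.2.2.2))))))

-- ===== PORT A =====
-- candidates = [k for k in asset_names if ("/"+robot_name+"/" in k) or (robot_name in k)]
def pvCandidates (robot_name : String) (asset_names : List String) : List String :=
  asset_names.filter (fun k => PySem.Str.isIn ("/" ++ robot_name ++ "/") k || PySem.Str.isIn robot_name k)

-- one step of the stable descending insertion realising sorted(..., key=pvKey, reverse=True):
-- exact because Python's reverse=True sort is stable (equal keys keep original order), hand-ported (4-tuple key)
def pvInsertDesc (x : String) : List String → List String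
  | [] => [x]
  | y :: ys => if pvKeyLt (pvKey y) (pvKey x) then x :: y :: ys else y :: pvInsertDesc x ys

def resolve_robot_model_name_py (robot_name : String) (asset_names : List String) : String :=
  if PySem.Set.contains asset_names robot_name then robot_name
  else
    -- for candidate in preferred.get(robot_name, []): if candidate in asset_names: return candidate
    match (PySem.Dict.getD pvPreferred robot_name []).find? (fun c => PySem.Set.contains asset_names c) with
    | some c => c
    | none =>
      let candidates := pvCandidates robot_name asset_names
      if candidates.length == 1 then candidates.headD ""
      else if candidates.length > 1 then
        ((candidates.foldl (fun acc x => pvInsertDesc x acc) []).headD "")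
      else "" -- Python raises KeyError here; excluded by Pre_

-- ===== PORT B =====
def resolve_robot_model_name_py_alt (robot_name : String) (asset_names : List String) : String :=
  -- for candidate in (robot_name, *preferred.get(robot_name, ())): if candidate in asset_names: return candidate
  match (robot_name :: PySem.Dict.getD pvPreferred robot_name []).find? (fun c => PySem.Set.contains asset_names c) with
  | some c => c
  | none =>
    -- best = None; for k in asset_names: if robot_name in k and (best is None or rank(k) > rank(best)): best = k
    match asset_names.foldl
      (fun best k =>
        if PySem.Str.isIn robot_name k then
          match best with
          | none => some k
          | some b => if pvKeyLt (pvKey b) (pvKey k) then some k else some b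
        else best) none with
    | some b => b
    | none => "" -- Python raises KeyError here; excluded by Pre_

-- ===== PRECONDITION & SPEC =====
-- Pre_ excludes exactly the inputs on which A raises KeyError (no exact, preferred or substring match).
def Pre_resolve_robot_model_name_py (robot_name : String) (asset_names : List String) : Prop :=
  PySem.Set.contains asset_names robot_name = true
  ∨ ((PySem.Dict.getD pvPreferred robot_name []).any (fun c => PySem.Set.contains asset_names c)) = true
  ∨ (asset_names.any (fun k => PySem.Str.isIn robot_name k)) = true
instance (robot_name : String) (asset_names : List String) : Decidable (Pre_resolve_robot_model_name_py robot_name asset_names) := by unfold Pre_resolve_robot_model_name_py; infer_instance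

def pvWitness_resolve_robot_model_name_py : String × List String :=
  ("allegro", ["dro/allegro/allegro_hand_left"])

def Spec_resolve_robot_model_name_py (robot_name : String) (asset_names : List String) (out : String) : Prop := out = resolve_robot_model_name_py_alt robot_name asset_names
instance (robot_name : String) (asset_names : List String) (out : String) : Decidable (Spec_resolve_robot_model_name_py robot_name asset_names out) := by unfold Spec_resolve_robot_model_name_py; infer_instance

-- ===== CLAIM =====
def Claim_equal_resolve_robot_model_name_py : Prop := ∀ (robot_name : String) (asset_names : List String), Dom_resolve_robot_model_name_py robot_name asset_names → Pre_resolve_robot_model_name_py robot_name asset_names → Spec_resolve_robot_model_name_py robot_name asset_names (resolve_robot_model_name_py robot_name asset_names)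

-- ===== LEMMAS AND PROOFS =====

-- "/"++rn++"/" is an infix of k only if rn is, so A's or-filter equals B's single substring test
theorem pvFilter_eq (rn : String) (an : List String) :
    pvCandidates rn an = an.filter (fun k => PySem.Str.isIn rn k) := by
  unfold pvCandidates
  apply List.filter_congr
  intro k _
  cases h : PySem.Str.isIn rn k
  · rw [Bool.or_false, ← Bool.not_eq_true, PySem.Str.isIn_iff_infix]
    intro hslash
    have hrn : PySem.Str.isIn rn k = true := by
      rw [PySem.Str.isIn_iff_infix]
      refine List.IsInfix.trans ?_ hslash
      refine ⟨['/'], ['/'], ?_⟩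
      simp
    rw [h] at hrn
    exact absurd hrn (by simp)
  · rw [Bool.or_true]

-- head of the stable descending insertion fold = the running-max fold
theorem pvFold_head (xs : List String) (b : String) (ac : List String) :
    ((xs.foldl (fun acc x => pvInsertDesc x acc) (b :: ac)).headD "")
      = xs.foldl (fun best x => if pvKeyLt (pvKey best) (pvKey x) then x else best) b := by
  induction xs generalizing b ac with
  | nil => simp
  | cons x xs ih =>
    simp only [List.foldl_cons, pvInsertDesc]
    by_cases h : pvKeyLt (pvKey b) (pvKey x)
    · simpa [h] using ih x (b :: ac)
    · simpa [h] using ih b (pvInsertDesc x ac)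

-- B's Option fold starting at some b = the plain running-max fold starting at b
theorem pvOptFold (xs : List String) (b : String) :
    xs.foldl (fun best k =>
        match best with
        | none => some k
        | some b => if pvKeyLt (pvKey b) (pvKey k) then some k else some b) (some b)
      = some (xs.foldl (fun best x => if pvKeyLt (pvKey best) (pvKey x) then x else best) b) := by
  induction xs generalizing b with
  | nil => rfl
  | cons x xs ih =>
    simp only [List.foldl_cons]
    by_cases h : pvKeyLt (pvKey b) (pvKey x) <;> simp [h, ih]

-- B's fallback fold over asset_names = the Option max fold over the filtered candidate list
theorem pvFold_filter (rn : String) (an : List String) :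
    an.foldl
      (fun best k =>
        if PySem.Str.isIn rn k then
          match best with
          | none => some k
          | some b => if pvKeyLt (pvKey b) (pvKey k) then some k else some b
        else best) none
    = (an.filter (fun k => PySem.Str.isIn rn k)).foldl
      (fun best k =>
        match best with
        | none => some k
        | some b => if pvKeyLt (pvKey b) (pvKey k) then some k else some b) none := by
  rw [List.foldl_filter]

-- ===== VERDICT =====
theorem resolve_robot_model_name_py_spec : Claim_equal_resolve_robot_model_name_py := by
  intro rn an _ hpre
  unfold Spec_resolve_robot_model_name_py
  unfold resolve_robot_model_name_py resolve_robot_model_name_py_alt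
  by_cases h1 : PySem.Set.contains an rn
  · rw [if_pos h1]
    have h1' : decide (rn ∈ an) = true := by simpa [PySem.Set.contains] using h1
    simp [List.find?, h1']
  · rw [if_neg h1]
    have hfindcons : (rn :: PySem.Dict.getD pvPreferred rn []).find? (fun c => PySem.Set.contains an c)
        = (PySem.Dict.getD pvPreferred rn []).find? (fun c => PySem.Set.contains an c) := by
      have h1' : decide (rn ∈ an) = false := by simpa [PySem.Set.contains] using h1
      simp [List.find?, h1']
    rw [hfindcons]
    cases hfind : (PySem.Dict.getD pvPreferred rn []).find? (fun c => PySem.Set.contains an c) with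
    | some c => rfl
    | none =>
      rw [pvFold_filter, ← pvFilter_eq]
      have hnofind : ¬ ((PySem.Dict.getD pvPreferred rn []).any (fun c => PySem.Set.contains an c) = true) := by
        intro hany
        rcases List.any_eq_true.mp hany with ⟨c, hc, hcontains⟩
        have := List.find?_eq_none.mp hfind c hc
        simp only [hcontains] at this
        exact this trivial
      have hcand : pvCandidates rn an ≠ [] := by
        rcases hpre with h | h | h
        · exact absurd h h1
        · exact absurd h hnofind
        · rcases List.any_eq_true.mp h with ⟨k, hk, hsub⟩
          rw [pvFilter_eq]
          exact List.ne_nil_of_mem (List.mem_filter.mpr ⟨hk, hsub⟩)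
      cases hC : pvCandidates rn an with
      | nil => exact absurd hC hcand
      | cons c rest =>
        rw [List.foldl_cons, pvOptFold]
        cases rest with
        | nil => simp
        | cons r rs =>
          rw [if_neg (by simp), if_pos (by simp)]
          simp only [List.foldl_cons, pvInsertDesc]
          by_cases h : pvKeyLt (pvKey c) (pvKey r)
          · simpa [h] using pvFold_head rs r [c]
          · simpa [h] using pvFold_head rs c [r]
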